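-- pv_equiv track=rewrite | github.com/hypo69/hypo | src/endpoints/ai_games/101_basic_computer_games/he/DIGITS/digits.py | compare_digits
-- ===== SOURCE A (Python) =====
-- def compare_digits(target, guess):
--     """
--     משווה את הספרות במספר המטרה ובניחוש המשתמש, ומחזירה את הרמזים.
--     :param target: מספר המטרה (מספר תלת-ספרתי)
--     :param guess: ניחוש המשתמש (מספר תלת-ספרתי)
--     :return: מחזירה מחרוזת של רמזים.
--     """
--     target_str = str(target)
--     guess_str = str(guess)
--     correct_place = 0 # מספר ספרות במקום הנכון
--     correct_digit = 0  # מספר ספרות נכונות במקום לא נכון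
--
--     # סופר ספרות במקום הנכון
--     for i in range(3):
--         if target_str[i] == guess_str[i]:
--             correct_place += 1
--
--     # סופר ספרות נכונות במקום שגוי
--     for i in range(3):
--         for j in range(3):
--             if i != j and target_str[i] == guess_str[j]:
--                 correct_digit += 1
--
--     return f"{correct_place} נכונים במקום, {correct_digit} נכונים במקום לא נכון."
-- ===== SOURCE B (Python) =====
-- def compare_digits(target, guess):
--     target_str = str(target)
--     guess_str = str(guess)
--     t3 = [target_str[0], target_str[1], target_str[2]]
--     g3 = [guess_str[0], guess_str[1], guess_str[2]]
--     counts = {}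
--     for b in g3:
--         counts[b] = counts.get(b, 0) + 1
--     total = 0
--     for a in t3:
--         total += counts.get(a, 0)
--     correct_place = 0
--     for a, b in zip(t3, g3):
--         if a == b:
--             correct_place += 1
--     correct_digit = total - correct_place
--     return f"{correct_place} נכונים במקום, {correct_digit} נכונים במקום לא נכון."
-- ===== Notes on version B (the rewrite author's own statement) =====
-- stated objective: alternative
-- what changed: B replaces A's nested i!=j double loop with a counting dict over the guess digits: total cross-matches are summed via counts, positional matches via zip, and misplaced matches are obtained as total minus positional.
import Mathlib
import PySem

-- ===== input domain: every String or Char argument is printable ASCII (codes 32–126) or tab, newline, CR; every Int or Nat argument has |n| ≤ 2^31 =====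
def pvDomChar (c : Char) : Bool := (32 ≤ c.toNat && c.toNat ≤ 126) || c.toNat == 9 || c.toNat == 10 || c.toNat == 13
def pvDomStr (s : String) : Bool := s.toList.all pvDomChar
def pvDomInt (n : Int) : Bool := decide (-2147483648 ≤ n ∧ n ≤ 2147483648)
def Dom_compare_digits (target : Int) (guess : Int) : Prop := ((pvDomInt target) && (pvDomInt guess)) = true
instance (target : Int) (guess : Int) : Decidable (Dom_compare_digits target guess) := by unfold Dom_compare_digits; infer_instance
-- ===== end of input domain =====

-- B replaces A's nested i≠j double loop by a counting dict over the guess digits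
-- (misplaced = total cross matches − positional matches); same return value everywhere A returns.

-- ===== PORT A =====
def compare_digits (target : Int) (guess : Int) : String :=
  let target_str := PySem.Int.toChars target
  let guess_str := PySem.Int.toChars guess
  -- for i in range(3): if target_str[i] == guess_str[i]: correct_place += 1
  let correct_place : Int := (PySem.List.pyRange 0 3 1).foldl (fun acc i =>
      match PySem.List.pyGet? target_str i, PySem.List.pyGet? guess_str i with
      | some a, some b => if a = b then acc + 1 else acc
      | _, _ => acc   -- none = IndexError in Python; such inputs are excluded by Pre_
      ) 0
  -- for i in range(3): for j in range(3): if i != j and target_str[i] == guess_str[j]: correct_digit += 1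
  let correct_digit : Int := (PySem.List.pyRange 0 3 1).foldl (fun acc i =>
      (PySem.List.pyRange 0 3 1).foldl (fun acc2 j =>
        if i ≠ j then
          match PySem.List.pyGet? target_str i, PySem.List.pyGet? guess_str j with
          | some a, some b => if a = b then acc2 + 1 else acc2
          | _, _ => acc2  -- none = IndexError in Python; excluded by Pre_
        else acc2) acc) 0
  PySem.Int.toStr correct_place ++ " נכונים במקום, " ++ PySem.Int.toStr correct_digit ++ " נכונים במקום לא נכון."

-- ===== PORT B =====
def compare_digits_alt (target : Int) (guess : Int) : String :=
  let target_str := PySem.Int.toChars target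
  let guess_str := PySem.Int.toChars guess
  -- t3 = [target_str[0], target_str[1], target_str[2]]; none = IndexError, excluded by Pre_
  let t3 := [(PySem.List.pyGet? target_str 0).getD ' ', (PySem.List.pyGet? target_str 1).getD ' ',
             (PySem.List.pyGet? target_str 2).getD ' ']
  let g3 := [(PySem.List.pyGet? guess_str 0).getD ' ', (PySem.List.pyGet? guess_str 1).getD ' ',
             (PySem.List.pyGet? guess_str 2).getD ' ']
  -- for b in g3: counts[b] = counts.get(b, 0) + 1
  let counts : PySem.Dict Char Int := g3.foldl (fun d b => d.insert b (d.getD b 0 + 1)) PySem.Dict.empty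
  -- for a in t3: total += counts.get(a, 0)
  let total : Int := t3.foldl (fun acc a => acc + counts.getD a 0) 0
  -- for a, b in zip(t3, g3): if a == b: correct_place += 1
  let correct_place : Int := (t3.zip g3).foldl (fun acc p => if p.1 = p.2 then acc + 1 else acc) 0
  let correct_digit := total - correct_place
  PySem.Int.toStr correct_place ++ " נכונים במקום, " ++ PySem.Int.toStr correct_digit ++ " נכונים במקום לא נכון."

-- ===== PRECONDITION & SPEC =====
-- Pre_ excludes exactly the inputs where str(target) or str(guess) has fewer than 3
-- characters; there both A and B raise IndexError in Python (neither returns a value).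
def Pre_compare_digits (target : Int) (guess : Int) : Prop :=
  3 ≤ (PySem.Int.toChars target).length ∧ 3 ≤ (PySem.Int.toChars guess).length
instance (target : Int) (guess : Int) : Decidable (Pre_compare_digits target guess) := by
  unfold Pre_compare_digits; infer_instance
def pvWitness_compare_digits : Int × Int := (123, 456)

def Spec_compare_digits (target : Int) (guess : Int) (out : String) : Prop := out = compare_digits_alt target guess
instance (target : Int) (guess : Int) (out : String) : Decidable (Spec_compare_digits target guess out) := by unfold Spec_compare_digits; infer_instance

-- ===== CLAIM (what is proved, stated in full; the proofs are below) =====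
def Claim_equal_compare_digits : Prop := ∀ (target : Int) (guess : Int), Dom_compare_digits target guess → Pre_compare_digits target guess → Spec_compare_digits target guess (compare_digits target guess)

-- ===== LEMMAS AND PROOFS =====

-- a lookup by a key absent from an association list yields the default
lemma pv_findmap_default {nu : Type} (a : Char) (l : List (Char × nu)) (d : nu)
    (h : ∀ p ∈ l, p.1 ≠ a) :
    (Option.map (fun x => x.2) (List.find? (fun p => p.1 == a) l)).getD d = d := by
  rw [List.find?_eq_none.mpr (by simpa using h)]; rfl

-- B's counting dict, built from the three guess characters, looked up at a:
-- it returns the number of guess characters equal to a.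
set_option maxHeartbeats 1000000 in
lemma pv_cnt (a g0 g1 g2 : Char) :
    (((PySem.Dict.empty.insert g0 ((PySem.Dict.empty : PySem.Dict Char Int).getD g0 0 + 1)).insert g1
        ((PySem.Dict.empty.insert g0 ((PySem.Dict.empty : PySem.Dict Char Int).getD g0 0 + 1)).getD g1 0 + 1)).insert g2
        (((PySem.Dict.empty.insert g0 ((PySem.Dict.empty : PySem.Dict Char Int).getD g0 0 + 1)).insert g1
        ((PySem.Dict.empty.insert g0 ((PySem.Dict.empty : PySem.Dict Char Int).getD g0 0 + 1)).getD g1 0 + 1)).getD g2 0 + 1)).getD a 0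
    = (if a = g0 then 1 else 0) + (if a = g1 then 1 else 0) + (if a = g2 then (1:Int) else 0) := by
  by_cases h1 : g0 = g1 <;> by_cases h2 : g0 = g2 <;> by_cases h3 : g1 = g2 <;>
    by_cases ha0 : a = g0 <;> by_cases ha1 : a = g1 <;> by_cases ha2 : a = g2 <;>
    simp_all [PySem.Dict.getD, PySem.Dict.get?, PySem.Dict.insert, PySem.Dict.empty] <;>
    first
      | (rw [if_neg (fun h => ‹¬ a = g2› h.symm)]; rfl)
      | exact pv_findmap_default a _ 0 (by
          intro p hp
          fin_cases hp <;>
            first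
              | exact fun h => ‹¬ a = g0› h.symm
              | exact fun h => ‹¬ a = g1› h.symm
              | exact fun h => ‹¬ a = g2› h.symm)

-- ===== VERDICT (by name: the statement is the Claim_ definition above) =====
set_option maxHeartbeats 4000000 in
theorem compare_digits_spec : Claim_equal_compare_digits := by
  intro target guess _hdom hpre
  obtain ⟨hp1, hp2⟩ := hpre
  unfold Spec_compare_digits
  have p0 : ∀ (a b c : Char) (r : List Char), PySem.List.pyGet? (a::b::c::r) 0 = some a := by
    intro a b c r; exact PySem.List.pyGet?_zero_cons a (b::c::r)
  have p1 : ∀ (a b c : Char) (r : List Char), PySem.List.pyGet? (a::b::c::r) 1 = some b := by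
    intro a b c r
    rw [show (1:Int) = ((1:Nat):Int) from rfl, PySem.List.pyGet?_natCast]; rfl
  have p2 : ∀ (a b c : Char) (r : List Char), PySem.List.pyGet? (a::b::c::r) 2 = some c := by
    intro a b c r
    rw [show (2:Int) = ((2:Nat):Int) from rfl, PySem.List.pyGet?_natCast]; rfl
  have er : PySem.List.pyRange 0 3 1 = [0, 1, 2] := by decide
  rcases hts : PySem.Int.toChars target with _ | ⟨t0, _ | ⟨t1, _ | ⟨t2, tr⟩⟩⟩ <;>
    rw [hts] at hp1 <;> try simp at hp1
  rcases htg : PySem.Int.toChars guess with _ | ⟨g0, _ | ⟨g1, _ | ⟨g2, gr⟩⟩⟩ <;>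
    rw [htg] at hp2 <;> try simp at hp2
  simp only [compare_digits, compare_digits_alt, hts, htg, er, List.foldl, List.zip,
    List.zipWith, p0, p1, p2, Option.getD_some, ne_eq, pv_cnt]
  norm_num
  split_ifs <;> rfl
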